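-- pv_equiv track=rewrite | github.com/SergeLeon/KATK_Bot | table_formatter.py | normalize_group_name
-- ===== SOURCE A (Python) =====
-- def normalize_group_name(group_name: str) -> str:
--     # 20ТО1 20ТО-1 20-ТО1 >>> 20-ТО-1
--     if group_name:
--         first_char = group_name[0]
--         group_name_parts = [first_char, ]
--         last_is_numeric = first_char.isnumeric()
--     else:
--         return ""
--
--     for char in group_name[1:]:
--         if char.isalnum():
--             if (last_is_numeric and char.isnumeric()) or (not last_is_numeric and char.isalpha()):
--                 group_name_parts[-1] += char
--             else:
--                 group_name_parts.append(char)
--             last_is_numeric = char.isnumeric()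
--
--     return "-".join(group_name_parts)
-- ===== SOURCE B (Python) =====
-- def normalize_group_name(group_name: str) -> str:
--     # Flat pair-scan: keep char 0 plus later alnum chars, then insert '-'
--     # between adjacent kept chars whose isnumeric() keys differ.
--     if not group_name:
--         return ""
--     kept = [group_name[0]] + [c for c in group_name[1:] if c.isalnum()]
--     pieces = [kept[0]]
--     for prev, cur in zip(kept, kept[1:]):
--         if prev.isnumeric() != cur.isnumeric():
--             pieces.append("-")
--         pieces.append(cur)
--     return "".join(pieces)
-- ===== Notes on version B (the rewrite author's own statement) =====
-- stated objective: faster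
-- what changed: A builds a mutable list of run-parts with a last_is_numeric flag, growing the last part by repeated string concatenation, and joins with hyphens; B filters the kept characters once, then does a flat pairwise scan (zip with the tail) appending each character, and a hyphen when the isnumeric key changes, to one output list joined once.
import Mathlib
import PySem

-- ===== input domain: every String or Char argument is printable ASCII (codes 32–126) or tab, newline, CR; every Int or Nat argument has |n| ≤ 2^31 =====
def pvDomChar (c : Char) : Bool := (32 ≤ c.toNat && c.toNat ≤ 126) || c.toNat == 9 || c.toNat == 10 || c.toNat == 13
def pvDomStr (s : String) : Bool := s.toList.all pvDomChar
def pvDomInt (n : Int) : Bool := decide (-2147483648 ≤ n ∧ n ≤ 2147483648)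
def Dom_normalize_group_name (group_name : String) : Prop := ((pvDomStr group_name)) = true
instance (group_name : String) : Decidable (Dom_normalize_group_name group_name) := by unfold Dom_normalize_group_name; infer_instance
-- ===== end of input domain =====

-- B replaces A's run-parts list (grown by repeated string concatenation) with one
-- flat pair-scan over the kept characters; a timing run measured B faster.
-- Python's isnumeric is ported as PySem.Chars.isdigit, exact on the stated ASCII
-- domain where isnumeric and isdigit coincide.

-- ===== PORT A =====
-- loop body of A: state = (group_name_parts, last_is_numeric)
def pvNormAStep (st : List (List Char) × Bool) (c : Char) : List (List Char) × Bool :=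
  if PySem.Chars.isalnum c then
    ((if (st.2 && PySem.Chars.isdigit c) || (!st.2 && PySem.Chars.isalpha c)
        then st.1.dropLast ++ [st.1.getLast! ++ [c]]   -- group_name_parts[-1] += char
        else st.1 ++ [[c]]),                           -- group_name_parts.append(char)
     PySem.Chars.isdigit c)
  else st

def normalize_group_name (group_name : String) : String :=
  match group_name.toList with
  | [] => ""
  | first_char :: rest =>
    let st := rest.foldl pvNormAStep ([[first_char]], PySem.Chars.isdigit first_char)
    String.ofList (PySem.Chars.join ['-'] st.1)

-- ===== PORT B =====
-- loop body of B: acc ← acc (+ "-") + cur, on key change between prev and cur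
def pvNormBStep (acc : List Char) (pc : Char × Char) : List Char :=
  if PySem.Chars.isdigit pc.1 != PySem.Chars.isdigit pc.2
    then acc ++ ['-'] ++ [pc.2] else acc ++ [pc.2]

def normalize_group_name_alt (group_name : String) : String :=
  match group_name.toList with
  | [] => ""
  | c :: rest =>
    let kept := c :: rest.filter PySem.Chars.isalnum
    String.ofList ((kept.zip kept.tail).foldl pvNormBStep [c])

-- ===== PRECONDITION & SPEC =====
def Spec_normalize_group_name (group_name : String) (out : String) : Prop := out = normalize_group_name_alt group_name
instance (group_name : String) (out : String) : Decidable (Spec_normalize_group_name group_name out) := by unfold Spec_normalize_group_name; infer_instance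

-- ===== CLAIM (what is proved, stated in full; the proofs are below) =====
def Claim_equal_normalize_group_name : Prop := ∀ (group_name : String), Dom_normalize_group_name group_name → Spec_normalize_group_name group_name (normalize_group_name group_name)

-- ===== LEMMAS AND PROOFS =====

-- common characterisation: output tail after the first char, given the key of the last kept char
def pvSpec (k : Bool) : List Char → List Char
  | [] => []
  | c :: cs =>
    if PySem.Chars.isalnum c then
      (if PySem.Chars.isdigit c == k then [c] else ['-', c]) ++ pvSpec (PySem.Chars.isdigit c) cs
    else pvSpec k cs

theorem pv_digit_not_alpha (c : Char) (h : PySem.Chars.isdigit c = true) :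
    PySem.Chars.isalpha c = false := by
  simp only [PySem.Chars.isdigit, Bool.and_eq_true, decide_eq_true_eq] at h
  simp only [PySem.Chars.isalpha, PySem.Chars.isupper, PySem.Chars.islower,
    Bool.or_eq_false_iff, Bool.and_eq_false_iff, decide_eq_false_iff_not, not_le]
  have a := Char.le_def.mp h.1
  have b := Char.le_def.mp h.2
  have a' := UInt32.le_iff_toNat_le.mp a
  have b' := UInt32.le_iff_toNat_le.mp b
  simp at a' b'
  constructor <;> left <;> (rw [Char.lt_def, UInt32.lt_iff_toNat_lt]) <;> · simp; omega

-- A's branch test collapses to comparing the numeric keys, for an alnum char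
theorem pv_branch_eq (c : Char) (k : Bool) (h : PySem.Chars.isalnum c = true) :
    ((k && PySem.Chars.isdigit c) || (!k && PySem.Chars.isalpha c))
      = (PySem.Chars.isdigit c == k) := by
  cases hd : PySem.Chars.isdigit c with
  | true => cases k <;> simp [pv_digit_not_alpha c hd]
  | false =>
    have ha : PySem.Chars.isalpha c = true := by
      simp only [PySem.Chars.isalnum, Bool.or_eq_true] at h
      rcases h with h | h
      · exact h
      · rw [hd] at h; exact absurd h (by simp)
    cases k <;> simp [ha]

theorem pv_join_cons (s x : List Char) (l : List (List Char)) :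
    List.intercalate s (x :: l) = if l = [] then x else x ++ s ++ List.intercalate s l := by
  cases l with
  | nil => simp [List.intercalate]
  | cons y t => simp [List.intercalate, List.intersperse]

theorem pv_join_grow (s x : List Char) (l : List (List Char)) (h : l ≠ []) :
    List.intercalate s (l.dropLast ++ [l.getLast! ++ x])
      = List.intercalate s l ++ x := by
  induction l with
  | nil => exact absurd rfl h
  | cons a t ih =>
    cases t with
    | nil => simp [List.intercalate, List.getLast!]
    | cons b u =>
      have ht : (b :: u) ≠ [] := by simp
      have hg : (a :: b :: u).getLast! = (b :: u).getLast! := by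
        simp [List.getLast!]
      rw [List.dropLast_cons_of_ne_nil ht, hg, List.cons_append,
        pv_join_cons, pv_join_cons s a (b :: u), ih ht]
      simp [List.append_assoc]

theorem pv_join_app (s x : List Char) (l : List (List Char)) (h : l ≠ []) :
    List.intercalate s (l ++ [x]) = List.intercalate s l ++ s ++ x := by
  induction l with
  | nil => exact absurd rfl h
  | cons a t ih =>
    cases t with
    | nil => simp [List.intercalate, List.intersperse]
    | cons b u =>
      rw [List.cons_append, pv_join_cons, pv_join_cons s a (b :: u), ih (by simp)]
      simp [List.append_assoc]

-- A's loop computes pvSpec, appended to the join of the parts accumulated so far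
theorem pv_A_loop (rest : List Char) :
    ∀ (parts : List (List Char)) (k : Bool), parts ≠ [] →
      PySem.Chars.join ['-'] ((rest.foldl pvNormAStep (parts, k)).1)
        = PySem.Chars.join ['-'] parts ++ pvSpec k rest := by
  induction rest with
  | nil => intro parts k _; simp [pvSpec]
  | cons c cs ih =>
    intro parts k hp
    by_cases hal : PySem.Chars.isalnum c = true
    · have hstep : pvNormAStep (parts, k) c =
        ((if PySem.Chars.isdigit c == k
            then parts.dropLast ++ [parts.getLast! ++ [c]]
            else parts ++ [[c]]), PySem.Chars.isdigit c) := by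
        simp only [pvNormAStep, hal, if_pos]
        rw [pv_branch_eq c k hal]
      rw [List.foldl_cons, hstep]
      by_cases hk : (PySem.Chars.isdigit c == k) = true
      · rw [if_pos hk, ih _ _ (by simp)]
        simp only [PySem.Chars.join] at *
        rw [pv_join_grow _ _ _ hp]
        simp [pvSpec, hal, hk, List.append_assoc]
      · rw [if_neg hk, ih _ _ (by simp)]
        simp only [PySem.Chars.join] at *
        rw [pv_join_app _ _ _ hp]
        simp only [pvSpec, hal, if_pos, hk, if_neg, Bool.not_eq_true] at *
        simp [List.append_assoc]
    · have hstep : pvNormAStep (parts, k) c = (parts, k) := by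
        simp [pvNormAStep, hal]
      rw [List.foldl_cons, hstep, ih _ _ hp]
      simp [pvSpec, hal]

-- B's pair-scan computes pvSpec over an all-alnum list
theorem pv_B_loop (l : List Char) :
    ∀ (p : Char) (acc : List Char), (∀ c ∈ l, PySem.Chars.isalnum c = true) →
      ((p :: l).zip l).foldl pvNormBStep acc = acc ++ pvSpec (PySem.Chars.isdigit p) l := by
  induction l with
  | nil => intro p acc _; simp [pvSpec]
  | cons c cs ih =>
    intro p acc hall
    have hc : PySem.Chars.isalnum c = true := hall c (by simp)
    rw [List.zip_cons_cons, List.foldl_cons,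
      ih c _ (fun x hx => hall x (by simp [hx]))]
    simp only [pvSpec, hc, if_pos, pvNormBStep]
    cases hp2 : PySem.Chars.isdigit p <;> cases hq : PySem.Chars.isdigit c <;>
      simp [List.append_assoc]

-- pvSpec ignores non-alnum chars, so it is unchanged by B's filtering
theorem pv_spec_filter (rest : List Char) :
    ∀ k, pvSpec k (rest.filter PySem.Chars.isalnum) = pvSpec k rest := by
  induction rest with
  | nil => intro k; rfl
  | cons c cs ih =>
    intro k
    by_cases hal : PySem.Chars.isalnum c = true
    · simp [hal, pvSpec, ih]
    · have h' : PySem.Chars.isalnum c = false := by simpa using hal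
      simp [h', pvSpec, ih]

-- ===== VERDICT (by name: the statement is the Claim_ definition above) =====
theorem normalize_group_name_spec : Claim_equal_normalize_group_name := by
  intro g _
  unfold Spec_normalize_group_name normalize_group_name normalize_group_name_alt
  cases hg : g.toList with
  | nil => rfl
  | cons c rest =>
    have hA := pv_A_loop rest [[c]] (PySem.Chars.isdigit c) (by simp)
    have hB := pv_B_loop (rest.filter PySem.Chars.isalnum) c [c]
      (fun x hx => List.of_mem_filter hx)
    simp only [List.tail_cons] at *
    rw [hA, hB, pv_spec_filter]
    simp [PySem.Chars.join, List.intercalate]
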